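-- pv_equiv track=rewrite | github.com/OliverBerger-ORBIS/ORBIS-Modellfabrik | omf2/ui/admin/admin_settings/gateway_subtab.py | _categorize_topics
-- ===== SOURCE A (Python) =====
-- def _categorize_topics(topics: list) -> dict:
--     """Categorize topics by their prefix for better visualization"""
--     categories = {
--         "Sensor Topics": [],
--         "Module Topics": [],
--         "FTS Topics": [],
--         "CCU Topics": [],
--         "Order Topics": [],
--         "Stock Topics": [],
--         "Other Topics": [],
--     }
--
--     for topic in topics:
--         if topic.startswith("/j1/txt/1/i/"):
--             categories["Sensor Topics"].append(topic)
--         elif topic.startswith("module/v1/ff/"):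
--             categories["Module Topics"].append(topic)
--         elif topic.startswith("fts/v1/ff/"):
--             categories["FTS Topics"].append(topic)
--         elif topic.startswith("ccu/order/"):
--             categories["Order Topics"].append(topic)
--         elif topic.startswith("ccu/"):
--             categories["CCU Topics"].append(topic)
--         elif "stock" in topic.lower():
--             categories["Stock Topics"].append(topic)
--         else:
--             categories["Other Topics"].append(topic)
--
--     # Remove empty categories
--     return {k: v for k, v in categories.items() if v}
-- ===== SOURCE B (Python) =====
-- # Different algorithm: stable-sort the topics by a numeric category rank, then
-- # split the sorted list into maximal runs of equal rank (two-pointer scan).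
-- # Stability of sorted() keeps the original order inside each category, the rank
-- # order reproduces the fixed dict key order, and empty categories never appear.
--
-- _NAMES = ["Sensor Topics", "Module Topics", "FTS Topics", "CCU Topics",
--           "Order Topics", "Stock Topics", "Other Topics"]
--
-- def _rank(topic):
--     if topic.startswith("/j1/txt/1/i/"):
--         return 0
--     if topic.startswith("module/v1/ff/"):
--         return 1
--     if topic.startswith("fts/v1/ff/"):
--         return 2
--     if topic.startswith("ccu/order/"):
--         return 4
--     if topic.startswith("ccu/"):
--         return 3
--     if "stock" in topic.lower():
--         return 5
--     return 6
--
-- def _categorize_topics(topics: list) -> dict: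
--     srt = sorted(topics, key=_rank)
--     result = {}
--     i, n = 0, len(srt)
--     while i < n:
--         r = _rank(srt[i])
--         j = i + 1
--         while j < n and _rank(srt[j]) == r:
--             j += 1
--         result[_NAMES[r]] = srt[i:j]
--         i = j
--     return result
-- ===== Notes on version B (the rewrite author's own statement) =====
-- stated objective: alternative
-- what changed: Instead of appending each topic into one of seven pre-made buckets and filtering out empty ones, B stable-sorts the topics by a numeric category rank and then splits the sorted list into maximal runs of equal rank; stability preserves per-category order and empty categories never materialise.
import Mathlib
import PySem

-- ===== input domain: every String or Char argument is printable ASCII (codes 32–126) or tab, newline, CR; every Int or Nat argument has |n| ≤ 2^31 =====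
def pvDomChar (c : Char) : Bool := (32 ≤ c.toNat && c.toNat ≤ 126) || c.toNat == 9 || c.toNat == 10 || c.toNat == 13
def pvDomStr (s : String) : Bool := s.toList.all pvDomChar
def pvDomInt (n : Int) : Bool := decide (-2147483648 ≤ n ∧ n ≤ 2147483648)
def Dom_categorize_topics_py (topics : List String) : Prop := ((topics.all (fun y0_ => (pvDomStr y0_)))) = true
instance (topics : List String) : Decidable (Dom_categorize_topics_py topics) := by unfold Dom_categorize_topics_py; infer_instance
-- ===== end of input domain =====

-- B replaces A's bucket-append pass + empty filter by a stable sort on a category rank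
-- followed by splitting the sorted list into runs of equal rank (objective: alternative).

-- ===== PORT A =====
def pvStepA (d : PySem.Dict String (List String)) (topic : String) : PySem.Dict String (List String) :=
  if PySem.Str.startswith topic "/j1/txt/1/i/" then
    d.insert "Sensor Topics" (d.getD "Sensor Topics" [] ++ [topic])
  else if PySem.Str.startswith topic "module/v1/ff/" then
    d.insert "Module Topics" (d.getD "Module Topics" [] ++ [topic])
  else if PySem.Str.startswith topic "fts/v1/ff/" then
    d.insert "FTS Topics" (d.getD "FTS Topics" [] ++ [topic])
  else if PySem.Str.startswith topic "ccu/order/" then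
    d.insert "Order Topics" (d.getD "Order Topics" [] ++ [topic])
  else if PySem.Str.startswith topic "ccu/" then
    d.insert "CCU Topics" (d.getD "CCU Topics" [] ++ [topic])
  else if PySem.Str.isIn "stock" (PySem.Str.lower topic) then
    d.insert "Stock Topics" (d.getD "Stock Topics" [] ++ [topic])
  else
    d.insert "Other Topics" (d.getD "Other Topics" [] ++ [topic])

def categorize_topics_py (topics : List String) : List (String × List String) :=
  let categories : PySem.Dict String (List String) := PySem.Dict.ofList
    [("Sensor Topics", []), ("Module Topics", []), ("FTS Topics", []), ("CCU Topics", []),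
     ("Order Topics", []), ("Stock Topics", []), ("Other Topics", [])]
  let final := topics.foldl pvStepA categories
  final.items.filter (fun kv => !kv.2.isEmpty)

-- ===== PORT B =====
def pvNames : List String :=
  ["Sensor Topics", "Module Topics", "FTS Topics", "CCU Topics",
   "Order Topics", "Stock Topics", "Other Topics"]

def pvRank (topic : String) : Nat :=
  if PySem.Str.startswith topic "/j1/txt/1/i/" then 0
  else if PySem.Str.startswith topic "module/v1/ff/" then 1
  else if PySem.Str.startswith topic "fts/v1/ff/" then 2
  else if PySem.Str.startswith topic "ccu/order/" then 4
  else if PySem.Str.startswith topic "ccu/" then 3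
  else if PySem.Str.isIn "stock" (PySem.Str.lower topic) then 5
  else 6

-- Source B's outer while loop over the sorted list, as recursion on the remainder; the inner
-- index scan j and the slice srt[i:j] are the takeWhile/dropWhile split at the first
-- rank change (exact: the scan advances while the rank equals r, the slice is the part
-- scanned over). _NAMES[r] is pvNames.getD r "" (r < 7 always, so Python never raises).
def pvRuns : List String → List (String × List String)
  | [] => []
  | t :: rest =>
      let r := pvRank t
      (pvNames.getD r "", t :: rest.takeWhile (fun u => pvRank u == r)) ::
        pvRuns (rest.dropWhile (fun u => pvRank u == r))
  termination_by l => l.length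
  decreasing_by
    simp only [List.length_cons]
    exact Nat.lt_succ_of_le (List.length_dropWhile_le _ _)

def categorize_topics_py_alt (topics : List String) : List (String × List String) :=
  pvRuns (PySem.List.sorted topics pvRank)

-- ===== PRECONDITION & SPEC =====
def Spec_categorize_topics_py (topics : List String) (out : List (String × List String)) : Prop := out = categorize_topics_py_alt topics
instance (topics : List String) (out : List (String × List String)) : Decidable (Spec_categorize_topics_py topics out) := by unfold Spec_categorize_topics_py; infer_instance

-- ===== CLAIM (what is proved, stated in full; the proofs are below) =====
def Claim_equal_categorize_topics_py : Prop := ∀ (topics : List String), Dom_categorize_topics_py topics → Spec_categorize_topics_py topics (categorize_topics_py topics)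

-- ===== LEMMAS AND PROOFS =====

-- the topics of category rank k, in input order
def pvF (k : Nat) (l : List String) : List String := l.filter (fun t => pvRank t == k)

theorem pvMem_F {k : Nat} {l : List String} {a : String} (h : a ∈ pvF k l) : pvRank a = k := by
  simp [pvF, List.mem_filter] at h; exact h.2

-- A's fold maintains, per category, the topics so far of that rank.
theorem pvFoldA (ts : List String) (s1 s2 s3 s4 s5 s6 s7 : List String) :
    ts.foldl pvStepA (PySem.Dict.mk
      [("Sensor Topics", s1), ("Module Topics", s2), ("FTS Topics", s3), ("CCU Topics", s4),
       ("Order Topics", s5), ("Stock Topics", s6), ("Other Topics", s7)]) =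
    PySem.Dict.mk
      [("Sensor Topics", s1 ++ pvF 0 ts), ("Module Topics", s2 ++ pvF 1 ts),
       ("FTS Topics", s3 ++ pvF 2 ts), ("CCU Topics", s4 ++ pvF 3 ts),
       ("Order Topics", s5 ++ pvF 4 ts), ("Stock Topics", s6 ++ pvF 5 ts),
       ("Other Topics", s7 ++ pvF 6 ts)] := by
  induction ts generalizing s1 s2 s3 s4 s5 s6 s7 with
  | nil => simp [pvF]
  | cons t ts ih =>
    simp only [List.foldl_cons]
    rw [pvStepA]
    split_ifs with h1 h2 h3 h4 h5 h6
    · simp at h1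
      have hc : pvRank t = 0 := by simp [pvRank, h1]
      simp [PySem.Dict.insert, PySem.Dict.getD, PySem.Dict.get?, ih, pvF, hc]
    · simp at h1 h2
      have hc : pvRank t = 1 := by simp [pvRank, h1, h2]
      simp [PySem.Dict.insert, PySem.Dict.getD, PySem.Dict.get?, ih, pvF, hc]
    · simp at h1 h2 h3
      have hc : pvRank t = 2 := by simp [pvRank, h1, h2, h3]
      simp [PySem.Dict.insert, PySem.Dict.getD, PySem.Dict.get?, ih, pvF, hc]
    · simp at h1 h2 h3 h4
      have hc : pvRank t = 4 := by simp [pvRank, h1, h2, h3, h4]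
      simp [PySem.Dict.insert, PySem.Dict.getD, PySem.Dict.get?, ih, pvF, hc]
    · simp at h1 h2 h3 h4 h5
      have hc : pvRank t = 3 := by simp [pvRank, h1, h2, h3, h4, h5]
      simp [PySem.Dict.insert, PySem.Dict.getD, PySem.Dict.get?, ih, pvF, hc]
    · simp at h1 h2 h3 h4 h5 h6
      have hc : pvRank t = 5 := by simp [pvRank, h1, h2, h3, h4, h5, h6]
      simp [PySem.Dict.insert, PySem.Dict.getD, PySem.Dict.get?, ih, pvF, hc]
    · simp at h1 h2 h3 h4 h5 h6
      have hc : pvRank t = 6 := by simp [pvRank, h1, h2, h3, h4, h5, h6]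
      simp [PySem.Dict.insert, PySem.Dict.getD, PySem.Dict.get?, ih, pvF, hc]

theorem pvInsertBy_skip {α : Type} (before : α → α → Bool) (x : α) (as bs : List α)
    (h : ∀ a ∈ as, before x a = false) :
    PySem.List.insertBy before x (as ++ bs) = as ++ PySem.List.insertBy before x bs := by
  induction as with
  | nil => simp
  | cons a as ih =>
    simp only [List.cons_append, PySem.List.insertBy, h a (by simp), Bool.false_eq_true,
      if_false]
    rw [ih (fun a ha => h a (by simp [ha]))]

theorem pvInsertBy_front {α : Type} (before : α → α → Bool) (x : α) (ys : List α)
    (h : ∀ y ∈ ys, before x y = true) :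
    PySem.List.insertBy before x ys = x :: ys := by
  cases ys with
  | nil => rfl
  | cons y ys => simp [PySem.List.insertBy, h y (by simp)]

theorem pvRank_lt (t : String) : pvRank t < 7 := by
  unfold pvRank; split_ifs <;> omega

-- the per-rank filters for ranks j, j+1, …, j+n-1, concatenated
def pvBlocks : Nat → Nat → List String → List String
  | 0, _, _ => []
  | n + 1, j, l => pvF j l ++ pvBlocks n (j + 1) l

theorem pvMem_blocks {n j : Nat} {l : List String} {b : String}
    (hb : b ∈ pvBlocks n j l) : j ≤ pvRank b ∧ pvRank b < j + n := by
  induction n generalizing j with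
  | zero => simp [pvBlocks] at hb
  | succ n ih =>
    simp only [pvBlocks, List.mem_append] at hb
    rcases hb with h | h
    · have := pvMem_F h; omega
    · have := ih h; omega

theorem pvF_snoc_ne {k : Nat} {x : String} (l : List String) (h : pvRank x ≠ k) :
    pvF k (l ++ [x]) = pvF k l := by
  have hb : (pvRank x == k) = false := by simp [h]
  simp [pvF, List.filter_append, List.filter, hb]

theorem pvF_snoc_eq {k : Nat} {x : String} (l : List String) (h : pvRank x = k) :
    pvF k (l ++ [x]) = pvF k l ++ [x] := by
  have hb : (pvRank x == k) = true := by simp [h]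
  simp [pvF, List.filter_append, List.filter, hb]

theorem pvBlocks_snoc_ne {n j : Nat} {x : String} (l : List String)
    (h : pvRank x < j ∨ j + n ≤ pvRank x) :
    pvBlocks n j (l ++ [x]) = pvBlocks n j l := by
  induction n generalizing j with
  | zero => simp [pvBlocks]
  | succ n ih =>
    simp only [pvBlocks]
    rw [pvF_snoc_ne l (by omega), ih (by omega)]

theorem pvInsert_blocks {n j : Nat} (x : String) (l : List String)
    (h1 : j ≤ pvRank x) (h2 : pvRank x < j + n) :
    PySem.List.insertBy (fun a b => decide (pvRank a < pvRank b)) x (pvBlocks n j l) =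
      pvBlocks n j (l ++ [x]) := by
  induction n generalizing j with
  | zero => omega
  | succ n ih =>
    simp only [pvBlocks]
    by_cases hj : j = pvRank x
    · rw [pvInsertBy_skip _ _ _ _ (fun a ha => by
        have := pvMem_F ha; simp [this]; omega)]
      rw [pvInsertBy_front _ _ _ (fun y hy => by
        have := pvMem_blocks hy; simp; omega)]
      rw [pvF_snoc_eq l hj.symm, pvBlocks_snoc_ne l (by omega)]
      simp
    · rw [pvInsertBy_skip _ _ _ _ (fun a ha => by
        have := pvMem_F ha; simp [this]; omega)]
      rw [ih (by omega) (by omega), pvF_snoc_ne l (by omega)]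

-- the stable sort by rank is the concatenation of the per-rank filters
theorem pvSortBlocks (l : List String) :
    PySem.List.sorted l pvRank = pvBlocks 7 0 l := by
  rw [PySem.List.sorted_eq_foldl_insertBy]
  induction l using List.reverseRecOn with
  | nil => simp [pvBlocks, pvF]
  | append_singleton l x ih =>
    rw [List.foldl_append, List.foldl_cons, List.foldl_nil, ih]
    exact pvInsert_blocks x l (Nat.zero_le _) (by simpa using pvRank_lt x)

theorem pvTakeWhile_blocks {p : String → Bool} (as bs : List String)
    (h1 : ∀ a ∈ as, p a = true) (h2 : ∀ b ∈ bs, p b = false) :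
    (as ++ bs).takeWhile p = as ∧ (as ++ bs).dropWhile p = bs := by
  induction as with
  | nil =>
    cases bs with
    | nil => simp
    | cons b bs => simp [h2 b (by simp)]
  | cons a as ih =>
    have := ih (fun a ha => h1 a (by simp [ha]))
    simp [h1 a (by simp), this.1, this.2]

theorem pvRuns_block (k : Nat) (B rest : List String)
    (hB : ∀ b ∈ B, pvRank b = k) (hrest : ∀ u ∈ rest, pvRank u ≠ k) :
    pvRuns (B ++ rest) =
      if B.isEmpty then pvRuns rest
      else (pvNames.getD k "", B) :: pvRuns rest := by
  cases B with
  | nil => simp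
  | cons t B' =>
    have ht : pvRank t = k := hB t (by simp)
    have hsplit := pvTakeWhile_blocks (p := fun u => pvRank u == pvRank t) B' rest
      (fun a ha => by simp [hB a (by simp [ha]), ht])
      (fun b hb => by simp [ht]; exact hrest b hb)
    rw [ht] at hsplit
    simp only [List.cons_append, pvRuns, ht, hsplit.1, hsplit.2, List.isEmpty_cons,
      if_false, Bool.false_eq_true]

-- splitting the block concatenation into runs = one pair per nonempty rank, in rank order
theorem pvRuns_blocks (n j : Nat) (l : List String) :
    pvRuns (pvBlocks n j l) =
      ((List.range' j n).map (fun k => (pvNames.getD k "", pvF k l))).filter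
        (fun kv => !kv.2.isEmpty) := by
  induction n generalizing j with
  | zero => simp [pvBlocks, pvRuns]
  | succ n ih =>
    simp only [pvBlocks, List.range'_succ, List.map_cons, List.filter_cons]
    rw [pvRuns_block j _ _ (fun b hb => pvMem_F hb)
      (fun u hu => by have := pvMem_blocks hu; omega), ih]
    by_cases h : (pvF j l).isEmpty <;> simp [h]

-- ===== VERDICT (by name: the statement is the Claim_ definition above) =====
theorem categorize_topics_py_spec : Claim_equal_categorize_topics_py := by
  intro topics _
  unfold Spec_categorize_topics_py categorize_topics_py categorize_topics_py_alt
  have hinit : (PySem.Dict.ofList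
      [("Sensor Topics", ([] : List String)), ("Module Topics", []), ("FTS Topics", []),
       ("CCU Topics", []), ("Order Topics", []), ("Stock Topics", []), ("Other Topics", [])]) =
      PySem.Dict.mk
      [("Sensor Topics", []), ("Module Topics", []), ("FTS Topics", []), ("CCU Topics", []),
       ("Order Topics", []), ("Stock Topics", []), ("Other Topics", [])] := by decide
  dsimp only
  rw [hinit, pvFoldA, pvSortBlocks, pvRuns_blocks]
  have hr : List.range' 0 7 = [0, 1, 2, 3, 4, 5, 6] := by decide
  simp [hr, pvNames]
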